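-- pv_equiv track=rewrite | github.com/lukedickens/recipe_analytics | repurposing/mysql/create.py | get_table_names_list
-- ===== SOURCE A (Python) =====
-- def get_table_names_list(table_names, exclude_table_names=None):
-- #    if table_names is None:
-- #        # use the reverse order of the created tables
-- #        table_names = [key for key in TABLES.keys()][::-1]
--     if type(table_names) is str:
--         table_names = table_names.split(',')
--     if not exclude_table_names is None:
--         if type(exclude_table_names) is str:
--             exclude_table_names = exclude_table_names.split(',')
--         for to_exclude in exclude_table_names:
--             if to_exclude in table_names:
--                 idx = table_names.index(to_exclude)
--                 table_names.pop(idx)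
--     return table_names
-- ===== SOURCE B (Python) =====
-- def get_table_names_list(table_names, exclude_table_names=None):
--     if type(table_names) is str:
--         table_names = table_names.split(',')
--     if exclude_table_names is None:
--         return table_names
--     if type(exclude_table_names) is str:
--         exclude_table_names = exclude_table_names.split(',')
--     counts = {}
--     for name in exclude_table_names:
--         counts[name] = counts.get(name, 0) + 1
--     result = []
--     for name in table_names:
--         if counts.get(name, 0) > 0:
--             counts[name] = counts.get(name, 0) - 1
--         else:
--             result.append(name)
--     table_names[:] = result
--     return table_names
-- ===== Notes on version B (the rewrite author's own statement) =====
-- stated objective: faster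
-- what changed: Replaces the per-exclude membership test + index + pop scans over table_names with a one-pass count table of the excludes followed by a single left-to-right pass that skips each name while its remaining count is positive (result written back via slice assignment to keep the in-place mutation).
import Mathlib
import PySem

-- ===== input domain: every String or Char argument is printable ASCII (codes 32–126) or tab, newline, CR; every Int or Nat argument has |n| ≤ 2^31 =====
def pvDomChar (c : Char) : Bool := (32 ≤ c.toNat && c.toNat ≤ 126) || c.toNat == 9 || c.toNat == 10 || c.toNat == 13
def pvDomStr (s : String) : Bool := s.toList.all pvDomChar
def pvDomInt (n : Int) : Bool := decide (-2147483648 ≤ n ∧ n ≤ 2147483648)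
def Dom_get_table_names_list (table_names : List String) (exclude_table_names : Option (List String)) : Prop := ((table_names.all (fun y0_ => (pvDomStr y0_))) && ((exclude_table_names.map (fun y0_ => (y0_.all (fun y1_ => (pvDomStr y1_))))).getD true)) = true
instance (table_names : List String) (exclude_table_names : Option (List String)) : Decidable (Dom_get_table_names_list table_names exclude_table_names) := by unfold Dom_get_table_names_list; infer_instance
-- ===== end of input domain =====

-- B replaces A's per-exclude membership/index/pop scans over table_names with a one-pass count
-- table of the excludes and a single filtering pass (faster); both Pythons mutate table_names in
-- place and the equivalence proved here is about the returned value (= the list's final contents).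


-- ===== PORT A =====
-- (the `type(...) is str` split branches can never fire for List String arguments, so they port away)
def get_table_names_list (table_names : List String) (exclude_table_names : Option (List String)) : List String :=
  match exclude_table_names with
  | none => table_names
  | some excl =>
    excl.foldl (fun tn to_exclude =>
      if to_exclude ∈ tn then
        match PySem.List.index? tn to_exclude with
        | some idx =>
          match PySem.List.pop? tn (idx : Int) with
          | some r => r.2
          | none => tn          -- unreachable: idx is a valid index
        | none => tn            -- unreachable: membership was checked
      else tn) table_names

-- ===== PORT B =====
def get_table_names_list_alt (table_names : List String) (exclude_table_names : Option (List String)) : List String :=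
  match exclude_table_names with
  | none => table_names
  | some excl =>
    let counts := excl.foldl (fun d name => d.insert name (d.getD name 0 + 1))
      (PySem.Dict.empty : PySem.Dict String Int)
    let st := table_names.foldl
      (fun (p : PySem.Dict String Int × List String) name =>
        if p.1.getD name 0 > 0 then (p.1.insert name (p.1.getD name 0 - 1), p.2)
        else (p.1, p.2 ++ [name])) (counts, [])
    st.2

-- ===== PRECONDITION & SPEC =====
def Spec_get_table_names_list (table_names : List String) (exclude_table_names : Option (List String)) (out : List String) : Prop := out = get_table_names_list_alt table_names exclude_table_names
instance (table_names : List String) (exclude_table_names : Option (List String)) (out : List String) : Decidable (Spec_get_table_names_list table_names exclude_table_names out) := by unfold Spec_get_table_names_list; infer_instance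

-- ===== CLAIM (what is proved, stated in full; the proofs are below) =====
def Claim_equal_get_table_names_list : Prop := ∀ (table_names : List String) (exclude_table_names : Option (List String)), Dom_get_table_names_list table_names exclude_table_names → Spec_get_table_names_list table_names exclude_table_names (get_table_names_list table_names exclude_table_names)

-- ===== LEMMAS AND PROOFS =====

-- A's loop body removes the first occurrence of `to_exclude` (or leaves the list unchanged).
theorem stepA_eq_erase (tn : List String) (x : String) :
    (if x ∈ tn then
        match PySem.List.index? tn x with
        | some idx =>
          match PySem.List.pop? tn (idx : Int) with
          | some r => r.2
          | none => tn
        | none => tn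
      else tn) = tn.erase x := by
  by_cases hx : x ∈ tn
  · simp only [hx, if_pos]
    obtain ⟨k, hk⟩ := Option.isSome_iff_exists.mp ((PySem.List.index?_isSome_iff tn x).mpr hx)
    rw [hk]
    obtain ⟨pre, suf, htn, hlen, hnot⟩ := (PySem.List.index?_eq_some_iff tn x k).mp hk
    have hklt : k < tn.length := by
      subst htn hlen; simp only [List.length_append, List.length_cons]; omega
    show (match PySem.List.pop? tn ((k : Nat) : Int) with
          | some r => r.2
          | none => tn) = tn.erase x
    rw [PySem.List.pop?_natCast tn k hklt]
    subst htn; subst hlen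
    rw [List.eraseIdx_append_of_length_le (le_refl _), List.erase_append_right _ (by simpa using hnot)]
    simp
  · rw [if_neg hx, List.erase_of_not_mem hx]

theorem foldl_erase_nil (excl : List String) :
    excl.foldl (fun (tn : List String) x => tn.erase x) [] = [] := by
  induction excl with
  | nil => rfl
  | cons x xs ih => simpa using ih

-- erases commute past a head element
theorem foldl_erase_cons (h : String) (t excl : List String) :
    excl.foldl (fun (tn : List String) x => tn.erase x) (h :: t) =
      if h ∈ excl then excl.erase h |>.foldl (fun tn x => tn.erase x) t
      else h :: excl.foldl (fun tn x => tn.erase x) t := by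
  induction excl generalizing t with
  | nil => simp
  | cons x xs ih =>
    by_cases hx : x = h
    · subst hx
      simp [List.foldl_cons, List.erase_cons_head]
    · have hiff : (h ∈ x :: xs) ↔ (h ∈ xs) := by
        rw [List.mem_cons]
        exact ⟨fun p => p.elim (fun e => absurd e.symm hx) id, Or.inr⟩
      simp only [List.foldl_cons, List.erase_cons_tail (by simp [Ne.symm hx] : ¬ (h == x) = true)]
      rw [ih]
      by_cases hmem : h ∈ xs
      · rw [if_pos hmem, if_pos (hiff.mpr hmem),
          List.erase_cons_tail (by simp [hx] : ¬ (x == h) = true), List.foldl_cons]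
      · rw [if_neg hmem, if_neg (fun p => hmem (hiff.mp p))]

-- the pure filtering pass, with the remaining counts as a function
def passF : List String → (String → Int) → List String
  | [], _ => []
  | h :: t, c =>
    if c h > 0 then passF t (fun v => if v = h then c v - 1 else c v)
    else h :: passF t c

theorem foldl_erase_eq_passF (excl tn : List String) :
    excl.foldl (fun (l : List String) x => l.erase x) tn =
      passF tn (fun v => (excl.count v : Int)) := by
  induction tn generalizing excl with
  | nil => simp [passF, foldl_erase_nil]
  | cons h t ih =>
    rw [foldl_erase_cons, passF]
    by_cases hmem : h ∈ excl
    · have hcnt : (0 : Int) < (excl.count h : Int) := by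
        exact_mod_cast List.count_pos_iff.mpr hmem
      rw [if_pos hmem, if_pos hcnt, ih]
      congr 1
      funext v
      by_cases hv : v = h
      · subst hv
        have h1 : 1 ≤ excl.count v := List.count_pos_iff.mpr hmem
        simp [List.count_erase_self, Nat.cast_sub h1]
      · simp [hv, List.count_erase_of_ne hv]
    · have hcnt : excl.count h = 0 := List.count_eq_zero.mpr hmem
      rw [if_neg hmem, hcnt]
      simp [ih]

-- B's second loop computes passF of the dict's counts
theorem foldl_B_eq_passF (tn : List String) (d : PySem.Dict String Int) (res : List String) :
    (tn.foldl
      (fun (p : PySem.Dict String Int × List String) name =>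
        if p.1.getD name 0 > 0 then (p.1.insert name (p.1.getD name 0 - 1), p.2)
        else (p.1, p.2 ++ [name])) (d, res)).2 =
      res ++ passF tn (fun v => d.getD v 0) := by
  induction tn generalizing d res with
  | nil => simp [passF]
  | cons h t ih =>
    simp only [List.foldl_cons]
    by_cases hc : d.getD h 0 > 0
    · rw [if_pos hc, ih, passF, if_pos hc]
      congr 2
      funext v
      rw [PySem.Dict.getD_insert]
      by_cases hv : v = h <;> simp [hv]
    · rw [if_neg hc, ih, passF, if_neg hc]
      simp

theorem countsD (excl : List String) (v : String) :
    (excl.foldl (fun d name => d.insert name (d.getD name 0 + 1))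
      (PySem.Dict.empty : PySem.Dict String Int)).getD v 0 = (excl.count v : Int) := by
  rw [PySem.Dict.foldl_insert_getD_add_one_eq_counter, PySem.Dict.getD_counter]

-- ===== VERDICT (by name: the statement is the Claim_ definition above) =====
theorem get_table_names_list_spec : Claim_equal_get_table_names_list := by
  intro tn ex _
  unfold Spec_get_table_names_list get_table_names_list get_table_names_list_alt
  cases ex with
  | none => rfl
  | some excl =>
    simp only
    rw [foldl_B_eq_passF, List.nil_append]
    have hA : excl.foldl (fun tn to_exclude =>
        if to_exclude ∈ tn then
          match PySem.List.index? tn to_exclude with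
          | some idx =>
            match PySem.List.pop? tn (idx : Int) with
            | some r => r.2
            | none => tn
          | none => tn
        else tn) tn = excl.foldl (fun (l : List String) x => l.erase x) tn := by
      have hf : (fun (tn : List String) to_exclude =>
          if to_exclude ∈ tn then
            match PySem.List.index? tn to_exclude with
            | some idx =>
              match PySem.List.pop? tn (idx : Int) with
              | some r => r.2
              | none => tn
            | none => tn
          else tn) = (fun (l : List String) x => l.erase x) :=
        funext fun a => funext fun x => stepA_eq_erase a x
      rw [hf]
    rw [hA, foldl_erase_eq_passF]
    congr 1
    funext v
    rw [countsD]
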